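-- pv_equiv track=rewrite | github.com/anon61/ODE-50-Lessons-Plan | process_lessons.py | ensure_latex_packages
-- ===== SOURCE A (Python) =====
-- def ensure_latex_packages(latex_content):
--     """Ensure necessary LaTeX packages are included."""
--     if '\\documentclass' not in latex_content:
--         return latex_content
--
--     required_packages = [
--         '\\usepackage{amsmath, amssymb, amsthm}',
--         '\\usepackage{geometry}',
--         '\\usepackage{enumitem}',
--         '\\usepackage{mdframed}',
--         '\\usepackage{xcolor}',
--         '\\usepackage{tikz}',
--     ]
--
--     # Check if packages are missing and add them
--     for package in required_packages:
--         package_name = package.split('{')[1].split(',')[0].split('}')[0]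
--         if package_name not in latex_content:
--             # Insert after documentclass
--             insert_pos = latex_content.find('\\begin{document}')
--             if insert_pos > 0:
--                 latex_content = latex_content[:insert_pos] + package + '\n' + latex_content[insert_pos:]
--
--     return latex_content
-- ===== SOURCE B (Python) =====
-- def _pkg_name(package):
--     return package.split('{')[1].split(',')[0].split('}')[0]
--
--
-- def ensure_latex_packages(latex_content):
--     """Ensure necessary LaTeX packages are included."""
--     if '\\documentclass' not in latex_content:
--         return latex_content
--
--     required_packages = [
--         '\\usepackage{amsmath, amssymb, amsthm}',
--         '\\usepackage{geometry}',
--         '\\usepackage{enumitem}',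
--         '\\usepackage{mdframed}',
--         '\\usepackage{xcolor}',
--         '\\usepackage{tikz}',
--     ]
--
--     # Scan once against the original content, then do a single splice.
--     missing = [p for p in required_packages if _pkg_name(p) not in latex_content]
--     if not missing:
--         return latex_content
--
--     insert_pos = latex_content.find('\\begin{document}')
--     if insert_pos <= 0:
--         return latex_content
--     block = ''.join(p + '\n' for p in missing)
--     return latex_content[:insert_pos] + block + latex_content[insert_pos:]
-- ===== Notes on version B (the rewrite author's own statement) =====
-- stated objective: simpler
-- what changed: B separates scanning from editing: one comprehension collects the missing package lines against the original content, then a single find and one splice insert the joined block, instead of A's interleaved re-find and re-concatenation of the whole document on every missing package.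
import Mathlib
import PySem

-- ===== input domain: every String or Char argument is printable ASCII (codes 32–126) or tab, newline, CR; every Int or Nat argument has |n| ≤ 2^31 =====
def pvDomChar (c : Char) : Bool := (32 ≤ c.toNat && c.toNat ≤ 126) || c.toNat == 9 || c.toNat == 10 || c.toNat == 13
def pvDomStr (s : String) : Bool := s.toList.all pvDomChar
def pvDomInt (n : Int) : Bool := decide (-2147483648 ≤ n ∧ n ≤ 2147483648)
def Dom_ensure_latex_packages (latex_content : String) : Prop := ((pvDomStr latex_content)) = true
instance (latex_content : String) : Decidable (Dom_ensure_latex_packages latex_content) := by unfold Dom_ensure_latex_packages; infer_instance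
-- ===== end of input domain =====

-- B separates the scan (collect missing package lines against the original content) from a single
-- find-and-splice edit, instead of A's per-package re-find and whole-document re-concatenation; objective: simpler.

-- shared constants of both Pythons
def pvDocclass : List Char := "\\documentclass".toList
def pvBeginDoc : List Char := "\\begin{document}".toList
def pvPkgs : List (List Char) :=
  [ "\\usepackage{amsmath, amssymb, amsthm}".toList,
    "\\usepackage{geometry}".toList,
    "\\usepackage{enumitem}".toList,
    "\\usepackage{mdframed}".toList,
    "\\usepackage{xcolor}".toList,
    "\\usepackage{tikz}".toList ]

-- package.split('{')[1].split(',')[0].split('}')[0]  (the [i] indexing and the '.getD []' defaults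
-- are never out of range / never hit on the constant packages both Pythons apply this to)
def pvName (q : List Char) : List Char :=
  let s1 := (PySem.Chars.split? q "{".toList).getD []
  let p1 := (PySem.List.pyGet? s1 1).getD []
  let s2 := (PySem.Chars.split? p1 ",".toList).getD []
  let p2 := (PySem.List.pyGet? s2 0).getD []
  let s3 := (PySem.Chars.split? p2 "}".toList).getD []
  (PySem.List.pyGet? s3 0).getD []

-- ===== PORT A =====
-- A's loop body: check membership in the CURRENT content, re-find '\begin{document}', splice one line
def pvStepA (cur q : List Char) : List Char :=
  if !(PySem.Chars.isIn (pvName q) cur) then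
    let pos := PySem.Chars.find cur pvBeginDoc
    if 0 < pos then
      PySem.List.slice cur none (some pos) ++ q ++ ['\n'] ++ PySem.List.slice cur (some pos) none
    else cur
  else cur

def pvCoreA (l : List Char) : List Char :=
  if !(PySem.Chars.isIn pvDocclass l) then l
  else pvPkgs.foldl pvStepA l

def ensure_latex_packages (latex_content : String) : String :=
  String.ofList (pvCoreA latex_content.toList)

-- ===== PORT B =====
def pvCoreB (l : List Char) : List Char :=
  if !(PySem.Chars.isIn pvDocclass l) then l
  else
    let missing := pvPkgs.filter (fun q => !(PySem.Chars.isIn (pvName q) l))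
    if missing.isEmpty then l
    else
      let pos := PySem.Chars.find l pvBeginDoc
      if pos ≤ 0 then l
      else
        PySem.List.slice l none (some pos)
          ++ (missing.map (fun q => q ++ ['\n'])).flatten
          ++ PySem.List.slice l (some pos) none

def ensure_latex_packages_alt (latex_content : String) : String :=
  String.ofList (pvCoreB latex_content.toList)

-- ===== PRECONDITION & SPEC =====
def Spec_ensure_latex_packages (latex_content : String) (out : String) : Prop := out = ensure_latex_packages_alt latex_content
instance (latex_content : String) (out : String) : Decidable (Spec_ensure_latex_packages latex_content out) := by unfold Spec_ensure_latex_packages; infer_instance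

-- ===== CLAIM (what is proved, stated in full; the proofs are below) =====
def Claim_equal_ensure_latex_packages : Prop := ∀ (latex_content : String), Dom_ensure_latex_packages latex_content → Spec_ensure_latex_packages latex_content (ensure_latex_packages latex_content)

-- ===== LEMMAS AND PROOFS =====

-- infix = occurrence at some position
lemma pv_infix_iff_occ (n z : List Char) : n <:+: z ↔ ∃ i, n <+: z.drop i := by
  constructor
  · intro h
    have := (PySem.Chars.isIn_iff_infix n z).mpr h
    exact (PySem.Chars.exists_prefix_drop_iff_isIn n z).mpr this
  · rintro ⟨i, h⟩
    exact h.isInfix.trans (List.drop_suffix i z).isInfix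

-- a character covered by an occurrence is a character of the pattern
lemma pv_occ_getElem? {n ys : List Char} {i k : Nat} (h : n <+: ys.drop i)
    (h1 : i ≤ k) (h2 : k < i + n.length) : ys[k]? = n[k - i]? := by
  obtain ⟨t, ht⟩ := h
  have e1 : (ys.drop i)[k - i]? = ys[i + (k - i)]? := List.getElem?_drop
  rw [← ht, List.getElem?_append_left (by omega)] at e1
  rw [show i + (k - i) = k by omega] at e1
  exact e1.symm

lemma pv_occ_mem {n ys : List Char} {i k : Nat} {c : Char} (h : n <+: ys.drop i)
    (h1 : i ≤ k) (h2 : k < i + n.length) (hc : ys[k]? = some c) : c ∈ n := by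
  have := pv_occ_getElem? h h1 h2
  exact List.mem_of_getElem? (this ▸ hc)

-- shrink a prefix of an append to a prefix of the left part
lemma pv_prefix_shrink {n a b : List Char} (h : n <+: a ++ b) (hl : n.length ≤ a.length) :
    n <+: a := by
  rw [List.prefix_iff_eq_take] at h ⊢
  rwa [List.take_append_of_le_length hl] at h

-- transport occurrences across an append
lemma pv_occ_left {n a : List Char} (b : List Char) {i : Nat} (hi : i ≤ a.length)
    (h : n <+: a.drop i) : n <+: (a ++ b).drop i := by
  rw [List.drop_append_of_le_length hi]
  exact h.trans (List.prefix_append _ _)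

lemma pv_drop_mid (a b : List Char) (j : Nat) : (a ++ b).drop (a.length + j) = b.drop j := by
  simp [List.drop_append]

lemma pv_occ_right {n b : List Char} (a : List Char) {j : Nat} (h : n <+: b.drop j) :
    n <+: (a ++ b).drop (a.length + j) := by
  rw [pv_drop_mid]; exact h

lemma pv_head_getElem? {z : List Char} {c : Char} (h : z.head? = some c) : z[0]? = some c := by
  cases z <;> simp_all

-- characters of the inserted line  L = '\'::(mid ++ ['\n'])
lemma pv_L_last (mid : List Char) :
    ('\\' :: (mid ++ ['\n']))[mid.length + 1]? = some '\n' := by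
  have : ('\\' :: (mid ++ ['\n'])) = ('\\' :: mid) ++ ['\n'] := by simp
  rw [this, List.getElem?_append_right (by simp)]
  simp

-- membership of a backslash-free, newline-free pattern is unaffected by inserting a line
-- '\'::(mid ++ ['\n']) at a position where the suffix starts with '\'
lemma pv_mem_insert_iff (pre mid suf n : List Char) (hn : n ≠ []) (hnb : '\\' ∉ n)
    (hnn : '\n' ∉ n) (hL : ¬ n <:+: ('\\' :: (mid ++ ['\n'])))
    (hs : suf.head? = some '\\') :
    (n <:+: (pre ++ ('\\' :: (mid ++ ['\n'])) ++ suf)) ↔ (n <:+: (pre ++ suf)) := by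
  have hnlen : 0 < n.length := List.length_pos_of_ne_nil hn
  set L : List Char := '\\' :: (mid ++ ['\n']) with hLdef
  have hLlen : L.length = mid.length + 2 := by simp [hLdef]
  have hcharP : (pre ++ (L ++ suf))[pre.length]? = some '\\' := by
    rw [List.getElem?_append_right (le_refl pre.length)]
    simp [hLdef]
  have hcharN : (pre ++ (L ++ suf))[pre.length + (mid.length + 1)]? = some '\n' := by
    rw [List.getElem?_append_right (by omega)]
    have h1 : (L ++ suf)[mid.length + 1]? = some '\n' := by
      rw [List.getElem?_append_left (by omega)]
      exact pv_L_last mid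
    simpa only [Nat.add_sub_cancel_left] using h1
  rw [List.append_assoc]
  constructor
  · intro h
    obtain ⟨i, hocc⟩ := (pv_infix_iff_occ _ _).mp h
    rw [pv_infix_iff_occ]
    by_cases hA : i + n.length ≤ pre.length
    · have hi : i ≤ pre.length := by omega
      rw [List.drop_append_of_le_length hi] at hocc
      have hp : n <+: pre.drop i := pv_prefix_shrink hocc (by rw [List.length_drop]; omega)
      exact ⟨i, pv_occ_left suf hi hp⟩
    · by_cases hB : i ≤ pre.length
      · exact absurd (pv_occ_mem hocc hB (by omega) hcharP) hnb
      · have hocc' : n <+: (L ++ suf).drop (i - pre.length) := by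
          rw [show i = pre.length + (i - pre.length) by omega, pv_drop_mid] at hocc
          exact hocc
        by_cases hC : i + n.length ≤ pre.length + L.length
        · have hiL : i - pre.length ≤ L.length := by omega
          rw [List.drop_append_of_le_length hiL] at hocc'
          have hin : n <+: L.drop (i - pre.length) :=
            pv_prefix_shrink hocc' (by rw [List.length_drop]; omega)
          exact absurd ((pv_infix_iff_occ n L).mpr ⟨_, hin⟩) hL
        · by_cases hD : i < pre.length + L.length
          · exact absurd (pv_occ_mem hocc (by omega) (by omega) hcharN) hnn
          · have hocc2 : n <+: suf.drop (i - pre.length - L.length) := by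
              rw [show i = pre.length + (L.length + (i - pre.length - L.length)) by omega,
                  pv_drop_mid, pv_drop_mid] at hocc
              exact hocc
            exact ⟨pre.length + (i - pre.length - L.length), pv_occ_right pre hocc2⟩
  · intro h
    obtain ⟨i, hocc⟩ := (pv_infix_iff_occ _ _).mp h
    rw [pv_infix_iff_occ]
    by_cases hA : i + n.length ≤ pre.length
    · have hi : i ≤ pre.length := by omega
      rw [List.drop_append_of_le_length hi] at hocc
      have hp : n <+: pre.drop i := pv_prefix_shrink hocc (by rw [List.length_drop]; omega)
      exact ⟨i, pv_occ_left (L ++ suf) hi hp⟩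
    · by_cases hB : i ≤ pre.length
      · have hchar : (pre ++ suf)[pre.length]? = some '\\' := by
          rw [List.getElem?_append_right (le_refl pre.length)]
          simpa using pv_head_getElem? hs
        exact absurd (pv_occ_mem hocc hB (by omega) hchar) hnb
      · have hocc' : n <+: suf.drop (i - pre.length) := by
          rw [show i = pre.length + (i - pre.length) by omega, pv_drop_mid] at hocc
          exact hocc
        refine ⟨pre.length + (L.length + (i - pre.length)), ?_⟩
        exact pv_occ_right pre (pv_occ_right L hocc')

-- after inserting a line in which '\begin{document}' does not occur, there is still no
-- occurrence of it before the end of the enlarged prefix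
lemma pv_find_step (pre mid suf tl : List Char) (hbd : pvBeginDoc = '\\' :: tl)
    (htl : '\\' ∉ tl) (hbn : '\n' ∉ pvBeginDoc)
    (hLbd : ¬ pvBeginDoc <:+: ('\\' :: (mid ++ ['\n'])))
    (hmin : ∀ i < pre.length, ¬ pvBeginDoc <+: (pre ++ suf).drop i) :
    ∀ i < pre.length + (mid.length + 2),
      ¬ pvBeginDoc <+: (pre ++ ('\\' :: (mid ++ ['\n'])) ++ suf).drop i := by
  have hblen : 0 < pvBeginDoc.length := by rw [hbd]; simp
  set L : List Char := '\\' :: (mid ++ ['\n']) with hLdef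
  have hLlen : L.length = mid.length + 2 := by simp [hLdef]
  have hcharN : (pre ++ (L ++ suf))[pre.length + (mid.length + 1)]? = some '\n' := by
    rw [List.getElem?_append_right (by omega)]
    have h1 : (L ++ suf)[mid.length + 1]? = some '\n' := by
      rw [List.getElem?_append_left (by omega)]
      exact pv_L_last mid
    simpa only [Nat.add_sub_cancel_left] using h1
  intro i hi
  rw [List.append_assoc]
  intro hocc
  by_cases hA : i + pvBeginDoc.length ≤ pre.length
  · have hilt : i ≤ pre.length := by omega
    rw [List.drop_append_of_le_length hilt] at hocc
    have hp : pvBeginDoc <+: pre.drop i := pv_prefix_shrink hocc (by rw [List.length_drop]; omega)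
    exact hmin i (by omega) (pv_occ_left suf hilt hp)
  · by_cases hB : i ≤ pre.length
    · by_cases hE : i = pre.length
      · subst hE
        have hocc' : pvBeginDoc <+: L ++ suf := by
          rw [show pre.length = pre.length + 0 by omega, pv_drop_mid, List.drop_zero] at hocc
          exact hocc
        by_cases hF : pvBeginDoc.length ≤ L.length
        · exact hLbd ((pv_infix_iff_occ _ _).mpr ⟨0, by simpa using pv_prefix_shrink hocc' hF⟩)
        · have hocc0 : pvBeginDoc <+: (L ++ suf).drop 0 := by simpa using hocc'
          have hch : (L ++ suf)[mid.length + 1]? = some '\n' := by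
            rw [List.getElem?_append_left (by omega)]
            exact pv_L_last mid
          exact hbn (pv_occ_mem hocc0 (by omega) (by omega) hch)
      · have hchP : (pre ++ (L ++ suf))[pre.length]? = some '\\' := by
          rw [List.getElem?_append_right (le_refl pre.length)]
          simp [hLdef]
        have hg : pvBeginDoc[pre.length - i]? = some '\\' :=
          (pv_occ_getElem? hocc hB (by omega)).symm.trans hchP
        rw [hbd, show pre.length - i = (pre.length - i - 1) + 1 by omega,
            List.getElem?_cons_succ] at hg
        exact htl (List.mem_of_getElem? hg)
    · have hocc' : pvBeginDoc <+: (L ++ suf).drop (i - pre.length) := by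
        rw [show i = pre.length + (i - pre.length) by omega, pv_drop_mid] at hocc
        exact hocc
      by_cases hD : i + pvBeginDoc.length ≤ pre.length + L.length
      · have hiL : i - pre.length ≤ L.length := by omega
        rw [List.drop_append_of_le_length hiL] at hocc'
        have hin : pvBeginDoc <+: L.drop (i - pre.length) :=
          pv_prefix_shrink hocc' (by rw [List.length_drop]; omega)
        exact hLbd ((pv_infix_iff_occ _ _).mpr ⟨_, hin⟩)
      · exact hbn (pv_occ_mem hocc (by omega) (by omega) hcharN)

-- find = k when there is an occurrence at k and none before
lemma pv_find_eq_occ (z bd : List Char) (k : Nat) (h1 : bd <+: z.drop k)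
    (h2 : ∀ i < k, ¬ bd <+: z.drop i) : PySem.Chars.find z bd = (k : Int) := by
  have hin : PySem.Chars.isIn bd z = true :=
    (PySem.Chars.exists_prefix_drop_iff_isIn bd z).mp ⟨k, h1⟩
  have h0 : 0 ≤ PySem.Chars.find z bd :=
    (PySem.Chars.find_nonneg_iff z bd).mpr ((PySem.Chars.isIn_iff_infix bd z).mp hin)
  obtain ⟨hp, hm⟩ := PySem.Chars.find_spec h0
  have hk : (PySem.Chars.find z bd).toNat = k := by
    rcases Nat.lt_trichotomy (PySem.Chars.find z bd).toNat k with h | h | h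
    · exact absurd hp (h2 _ h)
    · exact h
    · exact absurd h1 (hm k h)
  omega

lemma pv_isIn_congr {n z z' : List Char} (h : (n <:+: z) ↔ (n <:+: z')) :
    PySem.Chars.isIn n z = PySem.Chars.isIn n z' := by
  cases hz : PySem.Chars.isIn n z' with
  | true => exact (PySem.Chars.isIn_iff_infix n z).mpr (h.mpr ((PySem.Chars.isIn_iff_infix n z').mp hz))
  | false =>
      exact (PySem.Chars.isIn_eq_false_iff n z).mpr
        (fun hc => ((PySem.Chars.isIn_eq_false_iff n z').mp hz) (h.mp hc))

-- the suffix at the insertion point starts with '\'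
lemma pv_suf_head {suf : List Char} (h : pvBeginDoc <+: suf) : suf.head? = some '\\' := by
  obtain ⟨t, ht⟩ := h
  rw [← ht]; rfl

-- A's loop does nothing when find ≤ 0
lemma pv_foldA_id (ps : List (List Char)) (cur : List Char)
    (h : PySem.Chars.find cur pvBeginDoc ≤ 0) : ps.foldl pvStepA cur = cur := by
  induction ps with
  | nil => rfl
  | cons q ps ih =>
      have hs : pvStepA cur q = cur := by
        unfold pvStepA
        split
        · rw [if_neg (by omega)]
        · rfl
      rw [List.foldl_cons, hs, ih]

-- the main loop invariant: A's interleaved fold equals a single batched insertion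
lemma pv_loopA_eq (ps : List (List Char)) : ∀ (pre suf : List Char),
    (∀ q ∈ ps, pvName q ≠ [] ∧ '\\' ∉ pvName q ∧ '\n' ∉ pvName q ∧
        q.head? = some '\\' ∧ ¬ pvBeginDoc <:+: (q ++ ['\n'])) →
    ps.Pairwise (fun q q' => ¬ pvName q' <:+: (q ++ ['\n'])) →
    0 < pre.length →
    pvBeginDoc <+: suf →
    (∀ i < pre.length, ¬ pvBeginDoc <+: (pre ++ suf).drop i) →
    ps.foldl pvStepA (pre ++ suf) =
      pre ++ ((ps.filter (fun q => !(PySem.Chars.isIn (pvName q) (pre ++ suf)))).map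
                (fun q => q ++ ['\n'])).flatten ++ suf := by
  induction ps with
  | nil => intro pre suf _ _ _ _ _; simp
  | cons q ps ih =>
    intro pre suf hgood hpair hpre hsuf hmin
    obtain ⟨hqn, hqb, hqnl, hqh, hqbd⟩ := hgood q (by simp)
    obtain ⟨qt, hq⟩ : ∃ qt, q = '\\' :: qt := by
      cases q with
      | nil => simp at hqh
      | cons c cs =>
          simp at hqh
          exact ⟨cs, by rw [hqh]⟩
    have hgood' : ∀ r ∈ ps, pvName r ≠ [] ∧ '\\' ∉ pvName r ∧ '\n' ∉ pvName r ∧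
        r.head? = some '\\' ∧ ¬ pvBeginDoc <:+: (r ++ ['\n']) :=
      fun r hr => hgood r (by simp [hr])
    have hhead := (List.pairwise_cons.mp hpair).1
    have hpair' := (List.pairwise_cons.mp hpair).2
    have hq' : q ++ ['\n'] = '\\' :: (qt ++ ['\n']) := by rw [hq]; rfl
    rw [List.foldl_cons, List.filter_cons]
    by_cases hq1 : PySem.Chars.isIn (pvName q) (pre ++ suf) = true
    · have hstep : pvStepA (pre ++ suf) q = pre ++ suf := by
        unfold pvStepA; rw [hq1]; simp
      rw [hstep, hq1]
      simpa using ih pre suf hgood' hpair' hpre hsuf hmin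
    · have hq1' : PySem.Chars.isIn (pvName q) (pre ++ suf) = false :=
        Bool.eq_false_iff.mpr hq1
      have hfind : PySem.Chars.find (pre ++ suf) pvBeginDoc = (pre.length : Int) := by
        apply pv_find_eq_occ
        · rw [List.drop_left]; exact hsuf
        · exact hmin
      have hstep : pvStepA (pre ++ suf) q = (pre ++ (q ++ ['\n'])) ++ suf := by
        unfold pvStepA
        rw [hq1']
        simp only [Bool.not_false, if_true, hfind]
        rw [if_pos (by exact_mod_cast hpre)]
        rw [PySem.List.slice_to_natCast, PySem.List.slice_from_natCast,
            List.take_left, List.drop_left]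
        simp [List.append_assoc]
      rw [hstep]
      have hmin' : ∀ i < (pre ++ (q ++ ['\n'])).length,
          ¬ pvBeginDoc <+: ((pre ++ (q ++ ['\n'])) ++ suf).drop i := by
        intro i hi
        have hlen : (pre ++ (q ++ ['\n'])).length = pre.length + (qt.length + 2) := by
          simp [hq]
        have hstp := pv_find_step pre qt suf ("begin{document}".toList)
          (by decide) (by decide) (by decide) (by rw [← hq']; exact hqbd) hmin i
          (by omega)
        rw [hq']
        exact hstp
      have hpre' : 0 < (pre ++ (q ++ ['\n'])).length := by simp
      have hih := ih (pre ++ (q ++ ['\n'])) suf hgood' hpair' hpre' hsuf hmin'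
      rw [hih]
      have hfc : (ps.filter fun r => !(PySem.Chars.isIn (pvName r) ((pre ++ (q ++ ['\n'])) ++ suf)))
          = ps.filter fun r => !(PySem.Chars.isIn (pvName r) (pre ++ suf)) := by
        apply List.filter_congr
        intro r hr
        congr 1
        apply pv_isIn_congr
        obtain ⟨hrn, hrb, hrnl, _, _⟩ := hgood' r hr
        have hnotin : ¬ pvName r <:+: ('\\' :: (qt ++ ['\n'])) := by
          rw [← hq']; exact hhead r hr
        have hmem := pv_mem_insert_iff pre qt suf (pvName r) hrn hrb hrnl hnotin
          (pv_suf_head hsuf)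
        rw [hq']
        exact hmem
      rw [hfc, hq1']
      simp [List.append_assoc]

lemma pv_core_eq (l : List Char) : pvCoreA l = pvCoreB l := by
  unfold pvCoreA pvCoreB
  by_cases hdc : PySem.Chars.isIn pvDocclass l = true
  case neg =>
    rw [Bool.eq_false_iff.mpr hdc]
    simp
  case pos =>
    rw [hdc]
    simp only [Bool.not_true, Bool.false_eq_true, if_false]
    by_cases hpos : 0 < PySem.Chars.find l pvBeginDoc
    · have h0 : 0 ≤ PySem.Chars.find l pvBeginDoc := le_of_lt hpos
      obtain ⟨hp, hm⟩ := PySem.Chars.find_spec h0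
      have hFle : (PySem.Chars.find l pvBeginDoc).toNat ≤ l.length := by
        have := PySem.Chars.find_le_length l pvBeginDoc
        omega
      set F : Nat := (PySem.Chars.find l pvBeginDoc).toNat with hF
      have hFpos : 0 < F := by omega
      have hl : l.take F ++ l.drop F = l := List.take_append_drop F l
      have hprelen : (l.take F).length = F := by rw [List.length_take]; omega
      have hmin : ∀ i < (l.take F).length, ¬ pvBeginDoc <+: (l.take F ++ l.drop F).drop i := by
        rw [hl, hprelen]
        exact hm
      have hloop := pv_loopA_eq pvPkgs (l.take F) (l.drop F) (by decide) (by decide)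
        (by omega) hp hmin
      rw [hl] at hloop
      rw [hloop]
      by_cases hmiss : (pvPkgs.filter fun q => !(PySem.Chars.isIn (pvName q) l)) = []
      · rw [hmiss]
        simp [hl]
      · have hfind : PySem.Chars.find l pvBeginDoc = (F : Int) :=
          (Int.toNat_of_nonneg h0).symm
        rw [if_neg (by simp [hmiss])]
        rw [hfind, if_neg (by omega), PySem.List.slice_to_natCast,
            PySem.List.slice_from_natCast]
    · have hneg : PySem.Chars.find l pvBeginDoc ≤ 0 := by omega
      rw [pv_foldA_id _ _ hneg]
      by_cases hmiss : (pvPkgs.filter fun q => !(PySem.Chars.isIn (pvName q) l)) = []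
      · rw [if_pos (by simp [hmiss])]
      · rw [if_neg (by simp [hmiss]), if_pos hneg]

-- ===== VERDICT (by name: the statement is the Claim_ definition above) =====
theorem ensure_latex_packages_spec : Claim_equal_ensure_latex_packages := by
  intro s _
  unfold Spec_ensure_latex_packages ensure_latex_packages ensure_latex_packages_alt
  rw [pv_core_eq]
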